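-- pv_equiv track=rewrite | github.com/JVegaB/IA_tools | executive_assistant/scripts/fetch_timesheet_lines_date_range.py | pick_target_record
-- ===== SOURCE A (Python) =====
-- def pick_target_record(records, target_name):
--     target_name_lower = target_name.lower()
--
--     exact_matches = [
--         record for record in records
--         if record.get("name", "").lower() == target_name_lower
--     ]
--     if exact_matches:
--         return exact_matches[0]
--
--     prefix_matches = [
--         record for record in records
--         if record.get("name", "").lower().startswith(target_name_lower)
--     ]
--     if prefix_matches:
--         return prefix_matches[0]
--
--     contains_matches = [
--         record for record in records
--         if target_name_lower in record.get("name", "").lower()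
--     ]
--     if contains_matches:
--         return contains_matches[0]
--
--     return None
-- ===== SOURCE B (Python) =====
-- def pick_target_record(records, target_name, ):
--     target_name_lower = target_name.lower()
--     first_prefix = None
--     first_contains = None
--     for record in records:
--         name = record.get("name", "").lower()
--         if name == target_name_lower:
--             return record
--         if first_prefix is None and name.startswith(target_name_lower):
--             first_prefix = record
--         elif first_contains is None and target_name_lower in name:
--             first_contains = record
--     if first_prefix is not None:
--         return first_prefix
--     return first_contains
-- ===== Notes on version B (the rewrite author's own statement) =====
-- stated objective: simpler
-- what changed: Replaces A's three full list-comprehension passes over records with a single loop that returns early on an exact match and locks in the first prefix and first substring candidates.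
import Mathlib
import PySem

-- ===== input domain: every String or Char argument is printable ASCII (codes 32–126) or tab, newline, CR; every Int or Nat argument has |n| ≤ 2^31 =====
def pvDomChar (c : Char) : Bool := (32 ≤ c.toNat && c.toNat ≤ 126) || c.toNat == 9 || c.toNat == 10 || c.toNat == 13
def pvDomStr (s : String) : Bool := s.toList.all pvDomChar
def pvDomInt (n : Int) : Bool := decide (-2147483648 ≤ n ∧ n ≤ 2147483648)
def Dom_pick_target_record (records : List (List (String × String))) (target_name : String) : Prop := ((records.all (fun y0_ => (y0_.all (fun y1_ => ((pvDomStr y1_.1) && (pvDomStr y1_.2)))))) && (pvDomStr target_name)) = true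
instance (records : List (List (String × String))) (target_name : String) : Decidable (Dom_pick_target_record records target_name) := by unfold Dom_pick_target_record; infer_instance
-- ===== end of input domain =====

-- B replaces A's three full filtering passes by one early-returning loop keeping the first
-- prefix and first substring candidates (objective: simpler, one pass instead of three).

-- ===== PORT A =====
-- record.get("name", "").lower() for a record given as an association list
def pvName (r : List (String × String)) : String :=
  PySem.Str.lower (PySem.Dict.getD (PySem.Dict.mk r) "name" "")

def pick_target_record (records : List (List (String × String))) (target_name : String) : Option (List (String × String)) :=
  let target_name_lower := PySem.Str.lower target_name
  let exact_matches := records.filter (fun record => pvName record == target_name_lower)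
  match exact_matches with
  | record :: _ => some record
  | [] =>
    let prefix_matches := records.filter (fun record => PySem.Str.startswith (pvName record) target_name_lower)
    match prefix_matches with
    | record :: _ => some record
    | [] =>
      let contains_matches := records.filter (fun record => PySem.Str.isIn target_name_lower (pvName record))
      match contains_matches with
      | record :: _ => some record
      | [] => none

-- ===== PORT B =====
-- the for-loop of Source B: early return on exact match, else carry first_prefix / first_contains
def pickGo (t : String) : List (List (String × String)) → Option (List (String × String)) → Option (List (String × String)) → Option (List (String × String))
  | [], first_prefix, first_contains =>
    match first_prefix with
    | some r => some r
    | none => first_contains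
  | record :: rest, first_prefix, first_contains =>
    let name := pvName record
    if name == t then some record
    else if first_prefix.isNone && PySem.Str.startswith name t then
      pickGo t rest (some record) first_contains
    else if first_contains.isNone && PySem.Str.isIn t name then
      pickGo t rest first_prefix (some record)
    else
      pickGo t rest first_prefix first_contains

def pick_target_record_alt (records : List (List (String × String))) (target_name : String) : Option (List (String × String)) :=
  pickGo (PySem.Str.lower target_name) records none none

-- ===== PRECONDITION & SPEC =====
def Spec_pick_target_record (records : List (List (String × String))) (target_name : String) (out : Option (List (String × String))) : Prop := out = pick_target_record_alt records target_name
instance (records : List (List (String × String))) (target_name : String) (out : Option (List (String × String))) : Decidable (Spec_pick_target_record records target_name out) := by unfold Spec_pick_target_record; infer_instance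

-- ===== CLAIM (what is proved, stated in full; the proofs are below) =====
def Claim_equal_pick_target_record : Prop := ∀ (records : List (List (String × String))) (target_name : String), Dom_pick_target_record records target_name → Spec_pick_target_record records target_name (pick_target_record records target_name)

-- ===== LEMMAS AND PROOFS =====

-- prefix match implies substring match
theorem pv_startswith_imp_isIn (name t : String) (h : PySem.Str.startswith name t = true) :
    PySem.Str.isIn t name = true := by
  have hp : t.toList <+: name.toList := by
    have := h
    simp at this
    exact (PySem.Chars.startswith_iff name.toList t.toList).mp this
  exact (PySem.Str.isIn_iff_infix t name).mpr hp.isInfix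

-- what B's loop computes, in terms of A's three filters
def pickSpec (t : String) (rs : List (List (String × String)))
    (fp fc : Option (List (String × String))) : Option (List (String × String)) :=
  match rs.filter (fun r => pvName r == t) with
  | r :: _ => some r
  | [] =>
    match fp with
    | some r => some r
    | none =>
      match rs.filter (fun r => PySem.Str.startswith (pvName r) t) with
      | r :: _ => some r
      | [] =>
        match fc with
        | some r => some r
        | none =>
          match rs.filter (fun r => PySem.Str.isIn t (pvName r)) with
          | r :: _ => some r
          | [] => none

theorem pickGo_eq (t : String) (rs : List (List (String × String)))
    (fp fc : Option (List (String × String))) :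
    pickGo t rs fp fc = pickSpec t rs fp fc := by
  induction rs generalizing fp fc with
  | nil => cases fp <;> cases fc <;> rfl
  | cons r rest ih =>
    by_cases hex : (pvName r == t) = true
    · simp [pickGo, pickSpec, hex]
    · have hexF : (pvName r == t) = false := by simpa using hex
      by_cases hpf : PySem.Str.startswith (pvName r) t = true
      · have hct : PySem.Str.isIn t (pvName r) = true := pv_startswith_imp_isIn _ _ hpf
        have hpfC : PySem.Chars.startswith (pvName r).toList t.toList = true := by
          simpa using hpf
        have hctC : PySem.Chars.isIn t.toList (pvName r).toList = true := by
          simpa using hct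
        cases fp with
        | none =>
          simp only [pickGo, hexF, hpf, Option.isNone_none, Bool.true_and, Bool.false_eq_true,
            if_false, if_true]
          rw [ih]
          simp [pickSpec, hexF, hpfC]
        | some r0 =>
          cases fc with
          | none =>
            simp only [pickGo, hexF, hpf, hct, Option.isNone_some, Bool.false_and,
              Option.isNone_none, Bool.true_and, Bool.false_eq_true, if_false, if_true]
            rw [ih]
            simp [pickSpec, hexF]
          | some c0 =>
            simp only [pickGo, hexF, hct, Option.isNone_some, Bool.false_and,
              Bool.false_eq_true, if_false]
            rw [ih]
            simp [pickSpec, hexF]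
      · have hpfF : PySem.Str.startswith (pvName r) t = false := by simpa using hpf
        have hpfC : PySem.Chars.startswith (pvName r).toList t.toList = false := by
          simpa using hpfF
        by_cases hct : PySem.Str.isIn t (pvName r) = true
        · have hctC : PySem.Chars.isIn t.toList (pvName r).toList = true := by
            simpa using hct
          cases fc with
          | none =>
            simp only [pickGo, hexF, hpfF, hct, Bool.and_false, Option.isNone_none,
              Bool.true_and, Bool.false_eq_true, if_false, if_true]
            rw [ih]
            cases fp <;> simp [pickSpec, hexF, hpfC, hctC]
          | some c0 =>
            simp only [pickGo, hexF, hpfF, Bool.and_false, Option.isNone_some, Bool.false_and,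
              Bool.false_eq_true, if_false]
            rw [ih]
            cases fp <;> simp [pickSpec, hexF, hpfC]
        · have hctF : PySem.Str.isIn t (pvName r) = false := by simpa using hct
          have hctC : PySem.Chars.isIn t.toList (pvName r).toList = false := by
            simpa using hctF
          simp only [pickGo, hexF, hpfF, hctF, Bool.and_false, Bool.false_eq_true, if_false]
          rw [ih]
          cases fp <;> cases fc <;> simp [pickSpec, hexF, hpfC, hctC]

-- ===== VERDICT (by name: the statement is the Claim_ definition above) =====
theorem pick_target_record_spec : Claim_equal_pick_target_record := by
  intro records target_name _
  unfold Spec_pick_target_record pick_target_record pick_target_record_alt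
  rw [pickGo_eq]
  rfl
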